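-- pv_equiv track=rewrite | github.com/RheingoldRiver/advent-of-code | 18/part-2.py | count_enclosed_area
-- ===== SOURCE A (Python) =====
-- def count_enclosed_area(segments):
--     segments.sort(key=lambda x: (x[1], x[2]))  # Sort by primary coordinate
--
--     enclosed_area = 0
--     scan_line = -1
--     inside_polygon = False
--
--     for seg in segments:
--         if seg[0] == 'H':  # Horizontal segment
--             if seg[1] != scan_line:
--                 scan_line = seg[1]
--                 inside_polygon = False
--             if inside_polygon:
--                 enclosed_area += seg[3] - seg[2] + 1
--             inside_polygon = not inside_polygon
--         else:  # Vertical segment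
--             if seg[1] > scan_line:
--                 scan_line = seg[1]
--                 inside_polygon = False
--
--     return enclosed_area
-- ===== SOURCE B (Python) =====
-- def odd_sum(lens):
--     # sum of every second element (indices 1, 3, 5, ...)
--     if len(lens) < 2:
--         return 0
--     return lens[1] + odd_sum(lens[2:])
--
--
-- def count_enclosed_area(segments):
--     segments.sort(key=lambda x: (x[1], x[2]))  # same in-place sort as the original
--
--     # bucket the horizontal segments' lengths per row (insertion order = sorted order)
--     hs = [(s[1], s[3] - s[2] + 1) for s in segments if s[0] == 'H']
--     rows = {}
--     for y, length in hs:
--         rows[y] = rows.get(y, []) + [length]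
--
--     # in each row the 2nd, 4th, ... horizontal span closes an inside stretch
--     total = 0
--     for lens in rows.values():
--         total += odd_sum(lens)
--     return total
-- ===== Notes on version B (the rewrite author's own statement) =====
-- stated objective: alternative
-- what changed: Replaces the scan_line/inside_polygon boundary-state sweep with a per-row bucketing pass: horizontal segment lengths are grouped by row in a dict and each row contributes the sum of its odd-indexed (2nd, 4th, ...) spans.
import Mathlib
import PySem

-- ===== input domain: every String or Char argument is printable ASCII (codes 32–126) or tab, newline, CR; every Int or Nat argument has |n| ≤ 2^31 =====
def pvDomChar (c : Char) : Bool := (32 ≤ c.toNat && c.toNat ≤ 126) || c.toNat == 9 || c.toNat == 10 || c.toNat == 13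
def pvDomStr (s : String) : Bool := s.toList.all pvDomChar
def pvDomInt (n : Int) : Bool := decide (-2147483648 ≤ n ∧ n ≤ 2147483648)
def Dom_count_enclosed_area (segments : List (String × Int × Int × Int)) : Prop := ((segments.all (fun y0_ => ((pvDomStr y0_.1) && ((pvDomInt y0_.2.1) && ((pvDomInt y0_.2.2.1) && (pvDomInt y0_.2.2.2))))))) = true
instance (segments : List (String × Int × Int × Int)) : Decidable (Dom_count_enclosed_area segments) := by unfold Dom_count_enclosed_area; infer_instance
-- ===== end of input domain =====

-- B replaces A's scan_line/inside_polygon sweep by bucketing horizontal span lengths per row in a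
-- dict and summing each row's odd-indexed spans (objective: alternative decomposition, same cost).
-- Both Pythons sort `segments` in place (same side effect); the equivalence proved is about the RETURN value.

-- ===== PORT A =====
-- loop body of A's for-loop; state = (enclosed_area, scan_line, inside_polygon)
def stepA (st : Int × Int × Bool) (seg : String × Int × Int × Int) : Int × Int × Bool :=
  if seg.1 == "H" then
    let p : Int × Bool := if seg.2.1 ≠ st.2.1 then (seg.2.1, false) else (st.2.1, st.2.2)
    let area : Int := if p.2 then st.1 + (seg.2.2.2 - seg.2.2.1 + 1) else st.1
    (area, p.1, !p.2)
  else
    if st.2.1 < seg.2.1 then (st.1, seg.2.1, false) else st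

def count_enclosed_area (segments : List (String × Int × Int × Int)) : Int :=
  let s := PySem.List.sorted2 segments (fun x => x.2.1) (fun x => x.2.2.1)
  (s.foldl stepA (0, -1, false)).1

-- ===== PORT B =====
-- odd_sum: sum of every second element (indices 1, 3, 5, ...)
def oddSum : List Int → Int
  | [] => 0
  | [_] => 0
  | _ :: b :: t => b + oddSum t

def count_enclosed_area_alt (segments : List (String × Int × Int × Int)) : Int :=
  let s := PySem.List.sorted2 segments (fun x => x.2.1) (fun x => x.2.2.1)
  let hs := (s.filter (fun x => x.1 == "H")).map (fun x => (x.2.1, x.2.2.2 - x.2.2.1 + 1))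
  let rows := hs.foldl (fun (d : PySem.Dict Int (List Int)) p => d.modify p.1 [] (fun l => l ++ [p.2])) PySem.Dict.empty
  rows.values.foldl (fun t lens => t + oddSum lens) 0

-- ===== PRECONDITION & SPEC =====
def Spec_count_enclosed_area (segments : List (String × Int × Int × Int)) (out : Int) : Prop := out = count_enclosed_area_alt segments
instance (segments : List (String × Int × Int × Int)) (out : Int) : Decidable (Spec_count_enclosed_area segments out) := by unfold Spec_count_enclosed_area; infer_instance

-- ===== CLAIM (what is proved, stated in full; the proofs are below) =====
def Claim_equal_count_enclosed_area : Prop := ∀ (segments : List (String × Int × Int × Int)), Dom_count_enclosed_area segments → Spec_count_enclosed_area segments (count_enclosed_area segments)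

-- ===== LEMMAS AND PROOFS =====

-- the total B reads off a row dict
def dTot (d : PySem.Dict Int (List Int)) : Int := (d.values.map oddSum).sum

-- B's dict-building fold, pulled back through the filter/map onto the raw segment list
def buildD (l : List (String × Int × Int × Int)) (d : PySem.Dict Int (List Int)) : PySem.Dict Int (List Int) :=
  l.foldl (fun d seg => if seg.1 == "H" then d.modify seg.2.1 [] (fun w => w ++ [seg.2.2.2 - seg.2.2.1 + 1]) else d) d

theorem oddSum_append (l : List Int) (v : Int) :
    oddSum (l ++ [v]) = oddSum l + (if l.length % 2 = 1 then v else 0) := by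
  fun_induction oddSum l with
  | case1 => simp [oddSum]
  | case2 a => simp [oddSum]
  | case3 a b t ih => simp [oddSum, ih]; omega

theorem dTot_insert (items : List (Int × List Int)) (hnd : (items.map Prod.fst).Nodup) (y : Int) (w : List Int) :
    dTot ((PySem.Dict.mk items).insert y w)
      = dTot (PySem.Dict.mk items) + oddSum w - oddSum ((PySem.Dict.mk items).getD y []) := by
  induction items with
  | nil => simp [dTot, PySem.Dict.insert, PySem.Dict.contains, PySem.Dict.values,
      PySem.Dict.getD, PySem.Dict.get?, oddSum]
  | cons hd t ih =>
    obtain ⟨k, v⟩ := hd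
    simp only [List.map_cons, List.nodup_cons] at hnd
    by_cases hk : k = y
    · subst hk
      have hc : (PySem.Dict.mk ((k, v) :: t)).contains k = true := by
        simp [PySem.Dict.contains]
      have hmap : List.map (fun p => if (p.1 == k) = true then (k, w) else p) t = t := by
        conv_rhs => rw [← List.map_id t]
        apply List.map_congr_left
        intro p hp
        have hpk : p.1 ≠ k := fun h => hnd.1 (h ▸ List.mem_map_of_mem hp)
        simp [hpk]
      simp only [dTot, PySem.Dict.insert, hc, if_pos, List.map_cons, beq_self_eq_true, hmap,
        PySem.Dict.values, PySem.Dict.getD, PySem.Dict.get?, List.find?, List.sum_cons]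
      simp
      ring
    · have hbk : (k == y) = false := by simpa using hk
      have hgetD : (PySem.Dict.mk ((k, v) :: t)).getD y [] = (PySem.Dict.mk t).getD y [] := by
        simp [PySem.Dict.getD, PySem.Dict.get?, List.find?, hbk]
      have hstep : ((PySem.Dict.mk ((k, v) :: t)).insert y w).items
          = (k, v) :: ((PySem.Dict.mk t).insert y w).items := by
        by_cases hc : (t.any fun p => p.1 == y) = true <;>
          simp [PySem.Dict.insert, PySem.Dict.contains, hbk, hc, hk]
      have e1 : dTot ((PySem.Dict.mk ((k, v) :: t)).insert y w)
          = oddSum v + dTot ((PySem.Dict.mk t).insert y w) := by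
        simp [dTot, PySem.Dict.values, hstep]
      have e2 : dTot (PySem.Dict.mk ((k, v) :: t)) = oddSum v + dTot (PySem.Dict.mk t) := by
        simp [dTot, PySem.Dict.values]
      rw [e1, e2, hgetD, ih hnd.2]
      ring

theorem dTot_insert' (d : PySem.Dict Int (List Int)) (hnd : d.keys.Nodup) (y : Int) (w : List Int) :
    dTot (d.insert y w) = dTot d + oddSum w - oddSum (d.getD y []) := by
  obtain ⟨items⟩ := d
  exact dTot_insert items hnd y w


-- pairwise in the FIRST key of sorted2 (the library has this only for single-key sorted)
theorem insertBy_lex_pairwise {α : Type} (k1 : α → Int) (k2 : α → Int) (x : α) :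
    ∀ (ys : List α), ys.Pairwise (fun a b => k1 a ≤ k1 b) →
      (PySem.List.insertBy
          (fun a b => decide (k1 a < k1 b) || (!decide (k1 b < k1 a) && decide (k2 a < k2 b))) x ys).Pairwise
        (fun a b => k1 a ≤ k1 b) := by
  intro ys
  induction ys with
  | nil => intro _; simp [PySem.List.insertBy]
  | cons y t ih =>
    intro hp
    rw [List.pairwise_cons] at hp
    rw [PySem.List.insertBy]
    by_cases hb : (decide (k1 x < k1 y) || (!decide (k1 y < k1 x) && decide (k2 x < k2 y))) = true
    · rw [if_pos hb]
      have hxy : k1 x ≤ k1 y := by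
        rcases Bool.or_eq_true_iff.mp hb with h | h
        · exact le_of_lt (of_decide_eq_true h)
        · have := (Bool.and_eq_true_iff.mp h).1
          simp at this
          exact this
      refine List.pairwise_cons.mpr ⟨?_, List.pairwise_cons.mpr hp⟩
      intro b hbmem
      rcases List.mem_cons.mp hbmem with h | h
      · exact h ▸ hxy
      · exact le_trans hxy (hp.1 b h)
    · rw [if_neg hb]
      have hyx : k1 y ≤ k1 x := by
        simp only [Bool.or_eq_true_iff, Bool.and_eq_true_iff, decide_eq_true_eq, Bool.not_eq_true',
          decide_eq_false_iff_not, not_or, not_and] at hb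
        exact le_of_not_gt hb.1
      refine List.pairwise_cons.mpr ⟨?_, ih hp.2⟩
      intro b hbmem
      rcases (PySem.List.mem_insertBy _ _ _ _).mp hbmem with h | h
      · exact h ▸ hyx
      · exact hp.1 b h

theorem sorted2_pairwise_k1 {α : Type} (xs : List α) (k1 : α → Int) (k2 : α → Int) :
    (PySem.List.sorted2 xs k1 k2 false).Pairwise (fun a b => k1 a ≤ k1 b) := by
  have main : ∀ (l acc : List α), acc.Pairwise (fun a b => k1 a ≤ k1 b) →
      (l.foldl (fun acc x => PySem.List.insertBy
          (fun a b => decide (k1 a < k1 b) || (!decide (k1 b < k1 a) && decide (k2 a < k2 b))) x acc)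
        acc).Pairwise (fun a b => k1 a ≤ k1 b) := by
    intro l
    induction l with
    | nil => intro acc h; exact h
    | cons x t ih =>
      intro acc h
      exact ih _ (insertBy_lex_pairwise k1 k2 x acc h)
  exact main xs [] (by simp)

theorem sweep_eq_buildD :
    ∀ (l : List (String × Int × Int × Int)) (area sl : Int) (inside : Bool)
      (d : PySem.Dict Int (List Int)),
      l.Pairwise (fun a b => a.2.1 ≤ b.2.1) →
      d.keys.Nodup →
      (inside = true ↔ (d.getD sl []).length % 2 = 1) →
      (∀ seg ∈ l, seg.2.1 ≠ sl → d.getD seg.2.1 [] = []) →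
      (d.items ≠ [] → ∀ seg ∈ l, sl ≤ seg.2.1) →
      (l.foldl stepA (area, sl, inside)).1 = area + dTot (buildD l d) - dTot d := by
  intro l
  induction l with
  | nil => intro area sl inside d _ _ _ _ _; simp [buildD]
  | cons seg t ih =>
    intro area sl inside d hpw hnd h1 h3 h5
    rw [List.pairwise_cons] at hpw
    have hmem : seg ∈ seg :: t := List.mem_cons_self
    by_cases hH : (seg.1 == "H") = true
    · have hHs : seg.1 = "H" := by simpa using hH
      by_cases hy : seg.2.1 = sl
      · -- H in the current row
        have hstep : stepA (area, sl, inside) seg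
            = ((if inside then area + (seg.2.2.2 - seg.2.2.1 + 1) else area), sl, !inside) := by
          simp [stepA, hH, hy]
        have hbuild : buildD (seg :: t) d
            = buildD t (d.insert sl (d.getD sl [] ++ [seg.2.2.2 - seg.2.2.1 + 1])) := by
          simp [buildD, PySem.Dict.modify, hHs, hy]
        set v : Int := seg.2.2.2 - seg.2.2.1 + 1 with hv
        set d' : PySem.Dict Int (List Int) := d.insert sl (d.getD sl [] ++ [v]) with hd'
        have hnd' : d'.keys.Nodup := PySem.Dict.nodup_keys_insert _ _ _ hnd
        have h1' : (!inside) = true ↔ (d'.getD sl []).length % 2 = 1 := by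
          rw [hd', PySem.Dict.getD_insert_self]
          rcases Bool.eq_false_or_eq_true inside with h | h <;>
            simp [h, List.length_append] at h1 ⊢ <;> omega
        have h3' : ∀ b ∈ t, b.2.1 ≠ sl → d'.getD b.2.1 [] = [] := by
          intro b hb hbne
          rw [hd', PySem.Dict.getD_insert_of_ne _ _ _ hbne]
          exact h3 b (List.mem_cons_of_mem _ hb) hbne
        have h5' : d'.items ≠ [] → ∀ b ∈ t, sl ≤ b.2.1 := by
          intro _ b hb
          calc sl = seg.2.1 := hy.symm
            _ ≤ b.2.1 := hpw.1 b hb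
        have := ih (if inside then area + v else area) sl (!inside) d' hpw.2 hnd' h1' h3' h5'
        rw [List.foldl_cons, hstep, this, hbuild]
        have hdT : dTot d' = dTot d + (if inside then v else 0) := by
          rw [hd', dTot_insert' d hnd sl _, oddSum_append]
          rcases Bool.eq_false_or_eq_true inside with h | h <;>
            simp [h] at h1 ⊢ <;> omega
        rcases Bool.eq_false_or_eq_true inside with h | h <;> simp [h] at hdT ⊢ <;> omega
      · -- H starting a new row
        have hempty : d.getD seg.2.1 [] = [] := h3 seg hmem hy
        have hstep : stepA (area, sl, inside) seg = (area, seg.2.1, true) := by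
          simp [stepA, hH, hy]
        have hbuild : buildD (seg :: t) d
            = buildD t (d.insert seg.2.1 [seg.2.2.2 - seg.2.2.1 + 1]) := by
          simp [buildD, PySem.Dict.modify, hHs, hempty]
        set v : Int := seg.2.2.2 - seg.2.2.1 + 1 with hv
        set y : Int := seg.2.1 with hyy
        set d' : PySem.Dict Int (List Int) := d.insert y [v] with hd'
        have hnd' : d'.keys.Nodup := PySem.Dict.nodup_keys_insert _ _ _ hnd
        have h1' : (true : Bool) = true ↔ (d'.getD y []).length % 2 = 1 := by
          rw [hd', PySem.Dict.getD_insert_self]; simp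
        have hdnil : (∃ b, b ∈ t ∧ b.2.1 = sl) → d.items = [] := by
          rintro ⟨b, hb, hbsl⟩
          by_contra hne
          have h5b := h5 hne seg hmem
          have h2 : seg.2.1 ≤ b.2.1 := hpw.1 b hb
          rw [hbsl] at h2
          exact hy (le_antisymm h2 h5b)
        have h3' : ∀ b ∈ t, b.2.1 ≠ y → d'.getD b.2.1 [] = [] := by
          intro b hb hbne
          rw [hd', PySem.Dict.getD_insert_of_ne _ _ _ hbne]
          by_cases hbsl : b.2.1 = sl
          · have hdn : d.items = [] := hdnil ⟨b, hb, hbsl⟩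
            obtain ⟨items⟩ := d
            simp at hdn
            subst hdn
            simp [PySem.Dict.getD, PySem.Dict.get?]
          · exact h3 b (List.mem_cons_of_mem _ hb) hbsl
        have h5' : d'.items ≠ [] → ∀ b ∈ t, y ≤ b.2.1 := by
          intro _ b hb; exact hpw.1 b hb
        have := ih area y true d' hpw.2 hnd' h1' h3' h5'
        rw [List.foldl_cons, hstep, this, hbuild]
        have hdT : dTot d' = dTot d := by
          rw [hd', dTot_insert' d hnd y _, hempty]
          simp [oddSum]
        rw [hdT]
    · -- vertical segment
      have hHs : ¬ seg.1 = "H" := by simpa using hH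
      have hbuild : buildD (seg :: t) d = buildD t d := by
        simp [buildD, hHs]
      by_cases hgt : sl < seg.2.1
      · have hstep : stepA (area, sl, inside) seg = (area, seg.2.1, false) := by
          simp [stepA, hH, hgt]
        have hempty : d.getD seg.2.1 [] = [] := h3 seg hmem (by omega)
        have h1' : (false : Bool) = true ↔ (d.getD seg.2.1 []).length % 2 = 1 := by
          rw [hempty]; simp
        have h3' : ∀ b ∈ t, b.2.1 ≠ seg.2.1 → d.getD b.2.1 [] = [] := by
          intro b hb hbne
          have : seg.2.1 ≤ b.2.1 := hpw.1 b hb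
          exact h3 b (List.mem_cons_of_mem _ hb) (by omega)
        have h5' : d.items ≠ [] → ∀ b ∈ t, seg.2.1 ≤ b.2.1 := by
          intro _ b hb; exact hpw.1 b hb
        rw [List.foldl_cons, hstep, hbuild]
        exact ih area seg.2.1 false d hpw.2 hnd h1' h3' h5'
      · have hstep : stepA (area, sl, inside) seg = (area, sl, inside) := by
          simp [stepA, hH, hgt]
        rw [List.foldl_cons, hstep, hbuild]
        exact ih area sl inside d hpw.2 hnd h1
          (fun b hb => h3 b (List.mem_cons_of_mem _ hb))
          (fun hne b hb => h5 hne b (List.mem_cons_of_mem _ hb))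

theorem count_enclosed_area_eq (segments : List (String × Int × Int × Int)) :
    count_enclosed_area segments = count_enclosed_area_alt segments := by
  unfold count_enclosed_area count_enclosed_area_alt
  have hpw := sorted2_pairwise_k1 segments (fun x => x.2.1) (fun x => x.2.2.1)
  have hA := sweep_eq_buildD (PySem.List.sorted2 segments (fun x => x.2.1) (fun x => x.2.2.1))
      0 (-1) false PySem.Dict.empty hpw PySem.Dict.nodup_keys_empty
      (by simp [PySem.Dict.getD_empty])
      (by intro b _ _; simp [PySem.Dict.getD_empty])
      (by intro h; exact absurd rfl h)
  have hrows : (((PySem.List.sorted2 segments (fun x => x.2.1) (fun x => x.2.2.1)).filter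
        (fun x => x.1 == "H")).map (fun x => (x.2.1, x.2.2.2 - x.2.2.1 + 1))).foldl
      (fun (d : PySem.Dict Int (List Int)) p => d.modify p.1 [] (fun l => l ++ [p.2])) PySem.Dict.empty
      = buildD (PySem.List.sorted2 segments (fun x => x.2.1) (fun x => x.2.2.1)) PySem.Dict.empty := by
    rw [List.foldl_map, List.foldl_filter]
    rfl
  simp only [hrows, PySem.List.foldl_add, hA]
  have hempty : dTot (PySem.Dict.empty : PySem.Dict Int (List Int)) = 0 := rfl
  rw [hempty]
  unfold dTot
  omega

-- ===== VERDICT (by name: the statement is the Claim_ definition above) =====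
theorem count_enclosed_area_spec : Claim_equal_count_enclosed_area := by
  intro segments _
  unfold Spec_count_enclosed_area
  exact count_enclosed_area_eq segments
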